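-- pv_equiv track=rewrite | github.com/Baptmrtn/Advent_Of_Code_2021 | Day8.py | OutPutUpdate
-- ===== SOURCE A (Python) =====
-- def OutPutUpdate(data,updateLetter):
-- 	#Return the Output number with real letter for each segment
-- 	newList = []
-- 	for number in data:
-- 		newNumber = ""
-- 		for letter in number:
-- 			for realLetter in updateLetter:
-- 				if updateLetter[realLetter] == letter:
-- 					newNumber += realLetter
-- 					break
-- 		newList.append(newNumber)
-- 	return newList
-- ===== SOURCE B (Python) =====
-- def OutPutUpdate(data, updateLetter):
--     # Build the inverse mapping once (first key wins for a repeated value),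
--     # then translate each string with direct lookups instead of an inner scan.
--     inv = {}
--     for realLetter, segment in updateLetter.items():
--         inv.setdefault(segment, realLetter)
--     return ["".join(inv[letter] for letter in number if letter in inv)
--             for number in data]
-- ===== Notes on version B (the rewrite author's own statement) =====
-- stated objective: faster
-- what changed: Replaces the per-letter linear scan over the whole dict by a single precomputed inverse dictionary (setdefault keeps the first key per value) and a comprehension with O(1) lookups.
import Mathlib
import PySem

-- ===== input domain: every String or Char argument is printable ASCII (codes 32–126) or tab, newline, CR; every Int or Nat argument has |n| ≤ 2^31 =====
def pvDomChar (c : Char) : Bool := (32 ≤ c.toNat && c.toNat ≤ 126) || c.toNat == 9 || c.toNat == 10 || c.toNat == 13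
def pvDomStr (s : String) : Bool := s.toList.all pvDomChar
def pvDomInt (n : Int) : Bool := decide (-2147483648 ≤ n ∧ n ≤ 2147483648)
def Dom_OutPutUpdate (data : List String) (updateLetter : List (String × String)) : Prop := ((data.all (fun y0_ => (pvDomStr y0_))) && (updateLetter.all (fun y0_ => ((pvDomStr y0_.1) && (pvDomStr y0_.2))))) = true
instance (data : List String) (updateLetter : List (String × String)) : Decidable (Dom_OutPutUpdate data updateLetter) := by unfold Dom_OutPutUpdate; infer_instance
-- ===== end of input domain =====

-- B builds an inverse dictionary once instead of scanning the whole dict for every letter (asymptotically fewer scans); return values proved equal.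

-- ===== PORT A =====
-- inner 'for realLetter in updateLetter: if updateLetter[realLetter] == letter: newNumber += realLetter; break'
def pvScanA (d : PySem.Dict String String) (keys : List String) (letter : Char) (acc : List Char) : List Char :=
  match keys with
  | [] => acc
  | k :: rest =>
    if d.get? k == some (String.mk [letter]) then acc ++ k.toList
    else pvScanA d rest letter acc

def OutPutUpdate (data : List String) (updateLetter : List (String × String)) : List String :=
  let d := PySem.Dict.mk updateLetter
  data.foldl
    (fun newList number =>
      newList ++ [String.mk (number.toList.foldl (fun newNumber letter => pvScanA d d.keys letter newNumber) [])])
    []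

-- ===== PORT B =====
def OutPutUpdate_alt (data : List String) (updateLetter : List (String × String)) : List String :=
  let inv := updateLetter.foldl (fun acc p => acc.setdefault p.2 p.1) PySem.Dict.empty
  data.map (fun number =>
    String.mk ((number.toList.filterMap (fun letter => inv.get? (String.mk [letter]))).flatMap String.toList))

-- ===== PRECONDITION & SPEC =====
-- Pre_ excludes association lists with duplicate keys: they do not arise from a Python dict
-- (dict keys are unique), so the list encoding is ambiguous there.
def Pre_OutPutUpdate (data : List String) (updateLetter : List (String × String)) : Prop :=
  (updateLetter.map Prod.fst).Nodup
instance (data : List String) (updateLetter : List (String × String)) : Decidable (Pre_OutPutUpdate data updateLetter) := by unfold Pre_OutPutUpdate; infer_instance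
def pvWitness_OutPutUpdate : List String × (List (String × String)) := (["ab", "cba"], [("x", "a"), ("y", "b")])

def Spec_OutPutUpdate (data : List String) (updateLetter : List (String × String)) (out : List String) : Prop := out = OutPutUpdate_alt data updateLetter
instance (data : List String) (updateLetter : List (String × String)) (out : List String) : Decidable (Spec_OutPutUpdate data updateLetter out) := by unfold Spec_OutPutUpdate; infer_instance

-- ===== CLAIM (what is proved, stated in full; the proofs are below) =====
def Claim_equal_OutPutUpdate : Prop := ∀ (data : List String) (updateLetter : List (String × String)), Dom_OutPutUpdate data updateLetter → Pre_OutPutUpdate data updateLetter → Spec_OutPutUpdate data updateLetter (OutPutUpdate data updateLetter)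

-- ===== LEMMAS AND PROOFS =====

-- A's scan-with-break is the first key whose looked-up value is the letter
theorem pvScanA_eq_find (d : PySem.Dict String String) (keys : List String) (c : Char) (acc : List Char) :
    pvScanA d keys c acc =
      acc ++ ((keys.find? (fun k => d.get? k == some (String.mk [c]))).elim [] String.toList) := by
  induction keys with
  | nil => simp [pvScanA]
  | cons k rest ih =>
    simp only [pvScanA, List.find?]
    by_cases h : d.get? k == some (String.mk [c])
    · simp [h]
    · simp [h, ih]

-- scanning the keys of a faithful dict finds the first pair whose value is s
theorem find_keys_aux (d : PySem.Dict String String) (ps : List (String × String))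
    (h : ∀ p ∈ ps, d.get? p.1 = some p.2) (s : String) :
    (ps.map Prod.fst).find? (fun k => d.get? k == some s)
      = (ps.find? (fun p => p.2 == s)).map Prod.fst := by
  induction ps with
  | nil => simp
  | cons p rest ih =>
    obtain ⟨k, v⟩ := p
    simp only [List.map_cons, List.find?]
    rw [h (k, v) (List.mem_cons_self)]
    by_cases hv : v = s
    · simp [hv]
    · rw [show ((some v == some s) = false) by simpa using hv,
          show (((k, v).2 == s) = false) by simpa using hv]
      exact ih (fun p hp => h p (List.mem_cons_of_mem _ hp))

-- B's setdefault loop looks up the first pair whose value is s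
theorem inv_get?_eq (ps : List (String × String)) (d : PySem.Dict String String) (s : String) :
    (ps.foldl (fun acc p => acc.setdefault p.2 p.1) d).get? s
      = (d.get? s).or ((ps.find? (fun p => p.2 == s)).map Prod.fst) := by
  induction ps generalizing d with
  | nil => simp
  | cons p rest ih =>
    obtain ⟨k, v⟩ := p
    simp only [List.foldl_cons, ih, List.find?]
    by_cases hc : d.contains v
    · rw [PySem.Dict.setdefault_of_contains d k hc]
      by_cases hv : v = s
      · subst hv
        have hs : (d.get? v).isSome := by rw [← PySem.Dict.contains_eq_isSome_get?]; exact hc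
        obtain ⟨x, hx⟩ := Option.isSome_iff_exists.mp hs
        simp [hx]
      · rw [show (((k, v).2 == s) = false) by simpa using hv]
    · rw [PySem.Dict.setdefault_of_not_contains d k (by simpa using hc)]
      have hnone : d.get? v = none := by
        have h2 := PySem.Dict.contains_eq_isSome_get? d v
        simp only [Bool.not_eq_true] at hc
        rw [hc] at h2
        exact Option.not_isSome_iff_eq_none.mp (by simp [← h2])
      by_cases hv : v = s
      · subst hv
        rw [PySem.Dict.get?_insert_self, hnone]
        simp
      · rw [PySem.Dict.get?_insert_of_ne d k (fun h => hv h.symm),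
            show (((k, v).2 == s) = false) by simpa using hv]

-- the per-string fold of A equals B's filterMap/flatMap join
theorem chars_fold_eq (g : Char → Option String) (f : Char → List Char → List Char)
    (hf : ∀ c acc, f c acc = acc ++ ((g c).elim [] String.toList)) (cs : List Char) (acc : List Char) :
    cs.foldl (fun nn c => f c nn) acc = acc ++ (cs.filterMap g).flatMap String.toList := by
  induction cs generalizing acc with
  | nil => simp
  | cons c rest ih =>
    rw [List.foldl_cons, hf, ih, List.filterMap_cons]
    cases g c <;> simp

-- ===== VERDICT (by name: the statement is the Claim_ definition above) =====
theorem OutPutUpdate_spec : Claim_equal_OutPutUpdate := by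
  intro data updateLetter _ hpre
  unfold Spec_OutPutUpdate OutPutUpdate OutPutUpdate_alt
  simp only []
  rw [PySem.List.foldl_append_singleton_eq_map]
  apply List.map_congr_left
  intro number _
  have hkeys : (PySem.Dict.mk updateLetter).keys = updateLetter.map Prod.fst := rfl
  have hmem : ∀ p ∈ updateLetter, (PySem.Dict.mk updateLetter).get? p.1 = some p.2 := by
    intro p hp
    obtain ⟨k, v⟩ := p
    exact PySem.Dict.get?_of_mem_items (PySem.Dict.mk updateLetter) hp (by simpa [PySem.Dict.keys] using hpre)
  have hA : ∀ c acc, pvScanA (PySem.Dict.mk updateLetter) (PySem.Dict.mk updateLetter).keys c acc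
      = acc ++ (((updateLetter.foldl (fun acc p => acc.setdefault p.2 p.1) PySem.Dict.empty).get?
          (String.mk [c])).elim [] String.toList) := by
    intro c acc
    rw [pvScanA_eq_find, hkeys, find_keys_aux _ _ hmem, inv_get?_eq]
    simp
  rw [chars_fold_eq _ _ hA number.toList []]
  simp
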